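-- pv_equiv track=rewrite | github.com/AnkanMoh/flowspec | agents.py | rank_docs
-- ===== SOURCE A (Python) =====
-- from typing import Optional, List, Dict
--
-- def rank_docs(idea_text: str, docs: List[Dict[str, str]]):
--     idea_tokens = set(idea_text.lower().split())
--     scored = []
--
--     for d in docs:
--         text = (d.get("title", "") + " " + d.get("content", "")).lower()
--         score = len(idea_tokens & set(text.split()))
--         scored.append((score, d))
--
--     scored.sort(key=lambda x: x[0], reverse=True)
--     return [d for score, d in scored]
-- ===== SOURCE B (Python) =====
-- def rank_docs(idea_text: str, docs):
--     # Bucket (counting) sort over the bounded integer score instead of a comparison sort.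
--     idea_tokens = set(idea_text.lower().split())
--     n = len(idea_tokens)
--     buckets = [[] for _ in range(n + 1)]
--     for d in docs:
--         text = (d.get("title", "") + " " + d.get("content", "")).lower()
--         buckets[len(idea_tokens & set(text.split()))].append(d)
--     out = []
--     for s in reversed(range(n + 1)):
--         out += buckets[s]
--     return out
-- ===== Notes on version B (the rewrite author's own statement) =====
-- stated objective: alternative
-- what changed: Replaced the stable reverse=True comparison sort of (score, doc) pairs by a counting/bucket sort: docs are appended to a bucket per score (scores are bounded by len(idea_tokens)) and the buckets are concatenated from the highest score down, which preserves the stable tie order.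
import Mathlib
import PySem

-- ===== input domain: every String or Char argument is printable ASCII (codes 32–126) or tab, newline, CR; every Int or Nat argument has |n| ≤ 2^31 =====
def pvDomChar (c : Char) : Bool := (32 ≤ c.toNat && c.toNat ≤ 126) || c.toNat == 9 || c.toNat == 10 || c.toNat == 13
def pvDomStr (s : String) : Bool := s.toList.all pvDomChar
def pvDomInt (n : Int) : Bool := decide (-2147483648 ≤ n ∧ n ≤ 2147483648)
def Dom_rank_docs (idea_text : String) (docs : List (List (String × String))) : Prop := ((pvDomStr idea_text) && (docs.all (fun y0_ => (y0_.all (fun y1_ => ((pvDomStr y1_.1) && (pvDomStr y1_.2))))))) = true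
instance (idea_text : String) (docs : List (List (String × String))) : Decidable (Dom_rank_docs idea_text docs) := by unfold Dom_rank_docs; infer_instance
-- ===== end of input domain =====

-- B replaces A's stable reverse comparison sort by a bucket (counting) sort over the bounded
-- integer score, concatenating the buckets from the highest score down (an alternative algorithm).


-- ===== PORT A =====
-- helpers shared by both ports: BOTH Pythons compute `set(idea_text.lower().split())` and the
-- per-doc score `len(idea_tokens & set(((d.get("title","")+" "+d.get("content","")).lower()).split()))`
-- with the very same expressions, so their transcription is shared.
def ideaTokens (idea_text : String) : PySem.Set (List Char) :=
  PySem.Set.ofList (PySem.Chars.split₀ (PySem.Chars.lower idea_text.toList))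

-- score of one doc; the string concatenation (d.get("title","") + " " + d.get("content",""))
-- is done on the char lists, and Python's `len` of the intersection set is its list length.
def docScore (toks : PySem.Set (List Char)) (d : List (String × String)) : Nat :=
  (PySem.Set.inter toks (PySem.Set.ofList (PySem.Chars.split₀ (PySem.Chars.lower
    ((PySem.Dict.getD ⟨d⟩ "title" "").toList ++ (' ' :: (PySem.Dict.getD ⟨d⟩ "content" "").toList)))))).length

def rank_docs (idea_text : String) (docs : List (List (String × String))) : List (List (String × String)) :=
  -- scored = []; for d in docs: scored.append((score, d))
  -- scored.sort(key=lambda x: x[0], reverse=True); return [d for score, d in scored]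
  (PySem.List.sorted
      (docs.foldl (fun acc d => acc ++ [(docScore (ideaTokens idea_text) d, d)]) [])
      (fun x => x.1) true).map (fun p => p.2)

-- ===== PORT B =====
-- buckets[i].append(d)  (rebuilds the list; i is the in-range score)
def bucketsAdd {α : Type} (bs : List (List α)) (i : Nat) (d : α) : List (List α) :=
  match bs, i with
  | [], _ => []
  | b :: t, 0 => (b ++ [d]) :: t
  | b :: t, Nat.succ j => b :: bucketsAdd t j d

def rank_docs_alt (idea_text : String) (docs : List (List (String × String))) : List (List (String × String)) :=
  -- n = len(idea_tokens); buckets = [[] for _ in range(n+1)]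
  -- for d in docs: buckets[score].append(d)
  -- out = []; for s in reversed(range(n+1)): out += buckets[s]
  ((List.range ((ideaTokens idea_text).length + 1)).reverse).foldl
    (fun acc s => acc ++
      (docs.foldl (fun bs d => bucketsAdd bs (docScore (ideaTokens idea_text) d) d)
        (List.replicate ((ideaTokens idea_text).length + 1) [])).getD s []) []

-- ===== PRECONDITION & SPEC =====
def Spec_rank_docs (idea_text : String) (docs : List (List (String × String))) (out : List (List (String × String))) : Prop := out = rank_docs_alt idea_text docs
instance (idea_text : String) (docs : List (List (String × String))) (out : List (List (String × String))) : Decidable (Spec_rank_docs idea_text docs out) := by unfold Spec_rank_docs; infer_instance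

-- ===== CLAIM (what is proved, stated in full; the proofs are below) =====
def Claim_equal_rank_docs : Prop := ∀ (idea_text : String) (docs : List (List (String × String))), Dom_rank_docs idea_text docs → Spec_rank_docs idea_text docs (rank_docs idea_text docs)

-- ===== LEMMAS AND PROOFS =====

-- insertBy skips a prefix it does not insert into
theorem insertBy_skip {α : Type} (before : α → α → Bool) (x : α) (b r : List α)
    (h : ∀ y ∈ b, before x y = false) :
    PySem.List.insertBy before x (b ++ r) = b ++ PySem.List.insertBy before x r := by
  induction b with
  | nil => simp
  | cons y t ih =>
      simp only [List.cons_append, PySem.List.insertBy, h y (by simp)]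
      simp [ih (fun z hz => h z (by simp [hz]))]

-- insertBy puts x in front when it goes before everything
theorem insertBy_front {α : Type} (before : α → α → Bool) (x : α) (l : List α)
    (h : ∀ y ∈ l, before x y = true) :
    PySem.List.insertBy before x l = x :: l := by
  cases l with
  | nil => simp [PySem.List.insertBy]
  | cons y t => simp [PySem.List.insertBy, h y (by simp)]

-- inserting into a concatenation of score buckets (scores strictly decreasing)
-- appends x at the END of its own bucket: exactly the stability of the reverse=True sort.
theorem insertBy_flatMap_buckets {α : Type} (key : α → Nat) (ss : List Nat)
    (f : Nat → List α) (x : α) (hss : ss.Pairwise (· > ·)) (hx : key x ∈ ss)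
    (hf : ∀ k, ∀ p ∈ f k, key p = k) :
    PySem.List.insertBy (fun a b => decide (key b < key a)) x (ss.flatMap f)
      = ss.flatMap (fun k => f k ++ if key x = k then [x] else []) := by
  induction ss with
  | nil => cases hx
  | cons s ss' ih =>
      have hskip : ∀ y ∈ f s, (fun a b : α => decide (key b < key a)) x y = false := by
        intro y hy
        have hy1 := hf s y hy
        have hle : key x ≤ s := by
          rcases List.mem_cons.1 hx with h | h
          · exact le_of_eq h
          · exact le_of_lt ((List.pairwise_cons.1 hss).1 _ h)
        simp only [decide_eq_false_iff_not, not_lt, hy1]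
        omega
      rw [List.flatMap_cons, List.flatMap_cons,
        insertBy_skip (fun a b : α => decide (key b < key a)) x (f s) _ hskip]
      by_cases hxk : key x = s
      · have hall : ∀ y ∈ ss'.flatMap f, (fun a b : α => decide (key b < key a)) x y = true := by
          intro y hy
          rcases List.mem_flatMap.1 hy with ⟨k, hk, hyk⟩
          have h1 := hf k y hyk
          have h2 : k < s := (List.pairwise_cons.1 hss).1 _ hk
          simp only [decide_eq_true_eq, h1, hxk]
          omega
        rw [insertBy_front (fun a b : α => decide (key b < key a)) x _ hall, if_pos hxk]
        have hrest : ss'.flatMap (fun k => f k ++ if key x = k then [x] else []) = ss'.flatMap f := by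
          apply List.flatMap_congr
          intro k hk
          have : k < s := (List.pairwise_cons.1 hss).1 _ hk
          rw [if_neg (by omega), List.append_nil]
        rw [hrest]
        simp
      · have hx' : key x ∈ ss' := by
          rcases List.mem_cons.1 hx with h | h
          · exact absurd h hxk
          · exact h
        rw [ih (List.pairwise_cons.1 hss).2 hx', if_neg hxk, List.append_nil]

-- the whole reverse=True stable sort, as bucket concatenation
theorem foldl_insertBy_eq_buckets {α : Type} (key : α → Nat) (xs : List α) (ss : List Nat)
    (hss : ss.Pairwise (· > ·)) (hxs : ∀ p ∈ xs, key p ∈ ss) :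
    xs.foldl (fun acc x => PySem.List.insertBy (fun a b => decide (key b < key a)) x acc) []
      = ss.flatMap (fun k => xs.filter (fun p => decide (key p = k))) := by
  induction xs using List.reverseRecOn with
  | nil => simp
  | append_singleton ys x ih =>
      rw [List.foldl_append, List.foldl_cons, List.foldl_nil,
        ih (fun p hp => hxs p (by simp [hp])),
        insertBy_flatMap_buckets key ss _ x hss (hxs x (by simp))
          (fun k p hp => by simpa using (List.mem_filter.1 hp).2)]
      apply List.flatMap_congr
      intro k _
      by_cases h : key x = k <;> simp [List.filter_append, h]

theorem bucketsAdd_length {α : Type} (bs : List (List α)) (i : Nat) (d : α) :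
    (bucketsAdd bs i d).length = bs.length := by
  induction bs generalizing i with
  | nil => simp [bucketsAdd]
  | cons b t ih => cases i <;> simp [bucketsAdd, ih]

theorem bucketsAdd_getD {α : Type} (bs : List (List α)) (i j : Nat) (d : α)
    (hi : i < bs.length) :
    (bucketsAdd bs i d).getD j [] = if j = i then bs.getD j [] ++ [d] else bs.getD j [] := by
  induction bs generalizing i j with
  | nil => simp at hi
  | cons b t ih =>
      cases i with
      | zero =>
          cases j with
          | zero => simp [bucketsAdd]
          | succ j' => simp [bucketsAdd]
      | succ i' =>
          cases j with
          | zero => simp [bucketsAdd]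
          | succ j' =>
              simp only [bucketsAdd, List.getD_cons_succ]
              rw [ih i' j' (by simpa using hi)]
              simp

theorem foldl_bucketsAdd_getD {α : Type} (docs : List α) (sc : α → Nat)
    (bs : List (List α)) (h : ∀ d ∈ docs, sc d < bs.length) (i : Nat) :
    (docs.foldl (fun bs d => bucketsAdd bs (sc d) d) bs).getD i []
      = bs.getD i [] ++ docs.filter (fun d => decide (sc d = i)) := by
  induction docs generalizing bs with
  | nil => simp
  | cons d t ih =>
      rw [List.foldl_cons,
        ih (bucketsAdd bs (sc d) d)
          (fun e he => by rw [bucketsAdd_length]; exact h e (by simp [he])),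
        bucketsAdd_getD bs (sc d) i d (h d (by simp))]
      by_cases hd : sc d = i
      · simp [hd]
      · simp [hd, Ne.symm hd]

theorem docScore_le (toks : PySem.Set (List Char)) (d : List (String × String)) :
    docScore toks d ≤ toks.length := by
  unfold docScore
  exact List.length_filter_le _ toks

-- ===== VERDICT (by name: the statement is the Claim_ definition above) =====
theorem rank_docs_spec : Claim_equal_rank_docs := by
  intro idea_text docs _
  unfold Spec_rank_docs rank_docs rank_docs_alt
  set toks := ideaTokens idea_text with htoks
  set n := toks.length with hn
  set ss := (List.range (n + 1)).reverse with hss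
  have hpair : ss.Pairwise (· > ·) := by
    rw [hss, List.pairwise_reverse]
    exact List.pairwise_lt_range
  have hmem : ∀ d, docScore toks d ∈ ss := by
    intro d
    rw [hss, List.mem_reverse, List.mem_range]
    exact Nat.lt_succ_of_le (docScore_le toks d)
  -- A side: the appending loop is a map, the stable reverse sort is the bucket concatenation
  rw [PySem.List.foldl_append_singleton_eq_map, List.nil_append,
    PySem.List.sorted_rev_eq_foldl_insertBy,
    foldl_insertBy_eq_buckets (fun p : Nat × List (String × String) => p.1) _ ss hpair (by
      intro p hp
      rcases List.mem_map.1 hp with ⟨d, _, rfl⟩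
      exact hmem d),
    List.map_flatMap]
  -- B side: the out += buckets[s] loop is a flatMap
  rw [PySem.List.foldl_append_eq_flatMap (g := fun s =>
      (docs.foldl (fun bs d => bucketsAdd bs (docScore toks d) d) (List.replicate (n + 1) [])).getD s [])
      ss [], List.nil_append]
  -- bucket by bucket
  apply List.flatMap_congr
  intro k hk
  rw [foldl_bucketsAdd_getD docs (fun d => docScore toks d) (List.replicate (n + 1) [])
      (fun d _ => by simpa using Nat.lt_succ_of_le (docScore_le toks d)) k]
  simp [List.filter_map, Function.comp_def]
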